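-- pv_equiv track=rewrite | github.com/MrBrantCode/unitest_baseline | mut_generate/mist_train_taco/taco_15352/solution.py | alternate_sorted_string
-- ===== SOURCE A (Python) =====
-- def alternate_sorted_string(s: str) -> str:
--     upper = ''
--     lower = ''
--     res = ''
--
--     # Separate uppercase and lowercase letters
--     for char in s:
--         if char.isupper():
--             upper += char
--         else:
--             lower += char
--
--     # Sort the uppercase and lowercase letters
--     upper = sorted(upper)
--     lower = sorted(lower)
--
--     # Merge the sorted letters alternately
--     if len(upper) < len(lower):
--         for j in range(len(upper)):
--             res += upper[j] + lower[j]
--         for j in range(len(upper), len(lower)):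
--             res += lower[j]
--     elif len(lower) < len(upper):
--         for k in range(len(lower)):
--             res += upper[k] + lower[k]
--         for k in range(len(lower), len(upper)):
--             res += upper[k]
--     elif len(lower) == len(upper):
--         for i in range(len(lower)):
--             res += upper[i] + lower[i]
--
--     return res
-- ===== SOURCE B (Python) =====
-- def alternate_sorted_string(s: str) -> str:
--     # Counting sort over ASCII codes instead of comparison sorting, and an
--     # iterator-based single-pass merge instead of indexed branch loops.
--     cs = list(s)
--     upper = [chr(i) for i in range(65, 91) for _ in range(cs.count(chr(i)))]
--     lower = [chr(i) for i in range(128) if i < 65 or 91 <= i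
--              for _ in range(cs.count(chr(i)))]
--     it = iter(lower)
--     return ''.join(u + next(it, '') for u in upper) + ''.join(it)
-- ===== Notes on version B (the rewrite author's own statement) =====
-- stated objective: alternative
-- what changed: Comparison sorting of the two partitions is replaced by a counting sort over ASCII codes (build each sorted half by scanning code points 0..127 and repeating each character by its count), and the three-branch indexed merge by a single iterator-based pass that drains the lower iterator alongside upper.
import Mathlib
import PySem

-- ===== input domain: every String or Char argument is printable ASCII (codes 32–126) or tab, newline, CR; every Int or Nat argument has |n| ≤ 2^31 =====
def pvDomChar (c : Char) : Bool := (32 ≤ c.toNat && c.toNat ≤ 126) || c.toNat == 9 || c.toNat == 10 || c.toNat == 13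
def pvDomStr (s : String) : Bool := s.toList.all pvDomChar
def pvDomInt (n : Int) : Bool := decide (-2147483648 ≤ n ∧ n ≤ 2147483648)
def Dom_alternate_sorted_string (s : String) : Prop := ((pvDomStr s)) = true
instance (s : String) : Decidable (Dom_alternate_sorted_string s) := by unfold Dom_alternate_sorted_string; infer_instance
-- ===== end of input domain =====

-- B replaces A's comparison sorts by a counting sort over ASCII codes and the
-- three-branch indexed merge by a single iterator-style pass (alternative, same cost).

-- ===== PORT A =====
-- A: accumulate upper/non-upper by string concatenation, sort both, then an
-- indexed merge with three branches on the length comparison.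
def alternate_sorted_string (s : String) : String :=
  let p := s.toList.foldl
      (fun (p : List Char × List Char) c =>
        if PySem.Chars.isupper c then (p.1 ++ [c], p.2) else (p.1, p.2 ++ [c]))
      ([], [])
  let upper := PySem.List.sorted p.1 (fun c => c) false
  let lower := PySem.List.sorted p.2 (fun c => c) false
  let res : List Char :=
    if upper.length < lower.length then
      (PySem.List.pyRange (upper.length : Int) (lower.length : Int) 1).foldl
        (fun acc j => acc ++ [PySem.List.pyGetD lower j ' '])
        ((PySem.List.pyRange 0 (upper.length : Int) 1).foldl
          (fun acc j => acc ++ [PySem.List.pyGetD upper j ' ', PySem.List.pyGetD lower j ' ']) [])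
    else if lower.length < upper.length then
      (PySem.List.pyRange (lower.length : Int) (upper.length : Int) 1).foldl
        (fun acc j => acc ++ [PySem.List.pyGetD upper j ' '])
        ((PySem.List.pyRange 0 (lower.length : Int) 1).foldl
          (fun acc j => acc ++ [PySem.List.pyGetD upper j ' ', PySem.List.pyGetD lower j ' ']) [])
    else if lower.length = upper.length then
      (PySem.List.pyRange 0 (lower.length : Int) 1).foldl
        (fun acc j => acc ++ [PySem.List.pyGetD upper j ' ', PySem.List.pyGetD lower j ' ']) []
    else []
  String.ofList res

-- ===== PORT B =====
-- B-side helper: the generator ''.join(u + next(it, '') for u in upper) + ''.join(it),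
-- i.e. the single pass that consumes `upper` and drains the `lower` iterator alongside.
def pvInterleave : List Char → List Char → List Char
  | [], l => l
  | u :: us, [] => u :: pvInterleave us []
  | u :: us, l :: ls => u :: l :: pvInterleave us ls

-- B: counting sort — scan the ASCII codes in order and repeat each character by its
-- count — then the iterator merge above.
def alternate_sorted_string_alt (s : String) : String :=
  let cs := s.toList
  let upper := (PySem.List.pyRange 65 91 1).flatMap
      (fun i => List.replicate (PySem.List.count cs (Char.ofNat i.toNat)) (Char.ofNat i.toNat))
  let lower := (PySem.List.pyRange 0 128 1).flatMap
      (fun i => if i < 65 || 91 ≤ i then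
          List.replicate (PySem.List.count cs (Char.ofNat i.toNat)) (Char.ofNat i.toNat)
        else [])
  String.ofList (pvInterleave upper lower)

-- ===== PRECONDITION & SPEC =====
def Spec_alternate_sorted_string (s : String) (out : String) : Prop := out = alternate_sorted_string_alt s
instance (s : String) (out : String) : Decidable (Spec_alternate_sorted_string s out) := by unfold Spec_alternate_sorted_string; infer_instance

-- ===== CLAIM (what is proved, stated in full; the proofs are below) =====
def Claim_equal_alternate_sorted_string : Prop := ∀ (s : String), Dom_alternate_sorted_string s → Spec_alternate_sorted_string s (alternate_sorted_string s)

-- ===== LEMMAS AND PROOFS =====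

-- A's partition loop computes the two filters.
theorem pv_part (cs : List Char) (a b : List Char) :
    cs.foldl (fun (p : List Char × List Char) c =>
        if PySem.Chars.isupper c then (p.1 ++ [c], p.2) else (p.1, p.2 ++ [c])) (a, b)
    = (a ++ cs.filter (fun c => PySem.Chars.isupper c),
       b ++ cs.filter (fun c => !PySem.Chars.isupper c)) := by
  induction cs generalizing a b with
  | nil => simp
  | cons c cs ih =>
    by_cases h : PySem.Chars.isupper c = true <;>
      simp [h, ih]

-- A's paired loop over range(k) builds the flattened zip of the first k pairs.
theorem pv_pairs (d : Char) (u l : List Char) (k : Nat) (hu : k ≤ u.length) (hl : k ≤ l.length)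
    (acc : List Char) :
    (PySem.List.pyRange 0 (k : Int) 1).foldl
      (fun acc j => acc ++ [PySem.List.pyGetD u j d, PySem.List.pyGetD l j d]) acc
    = acc ++ ((u.zip l).take k).flatMap (fun p => [p.1, p.2]) := by
  induction k generalizing acc with
  | zero => simp [PySem.List.pyRange_one_eq_nil]
  | succ k ih =>
    have hk : (0:Int) ≤ (k : Int) := by positivity
    have hrw : PySem.List.pyRange 0 ((k:Nat)+1 : Nat) 1
        = PySem.List.pyRange 0 (k : Int) 1 ++ [(k : Int)] := by
      push_cast
      exact PySem.List.pyRange_one_succ_right hk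
    rw [hrw, List.foldl_append, ih (by omega) (by omega)]
    have hzk : k < (u.zip l).length := by
      simp [List.length_zip]; omega
    have hz : (u.zip l).take (k+1) = (u.zip l).take k ++ [(u.zip l)[k]] := by
      rw [List.take_add_one]
      simp [List.getElem?_eq_getElem hzk]
    rw [hz]
    have hgu : PySem.List.pyGetD u (k : Int) d = u[k]'(by omega) := by
      simp [PySem.List.pyGetD_natCast, List.getD_eq_getElem?_getD, List.getElem?_eq_getElem (by omega : k < u.length)]
    have hgl : PySem.List.pyGetD l (k : Int) d = l[k]'(by omega) := by
      simp [PySem.List.pyGetD_natCast, List.getD_eq_getElem?_getD, List.getElem?_eq_getElem (by omega : k < l.length)]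
    simp [hgu, hgl, List.getElem_zip]

-- A's tail loop appends the tail of xs from index m.
theorem pv_tail (d : Char) (xs : List Char) (m : Nat) (acc : List Char) :
    (PySem.List.pyRange (m : Int) (xs.length : Int) 1).foldl
      (fun acc j => acc ++ [PySem.List.pyGetD xs j d]) acc
    = acc ++ xs.drop m := by
  rw [PySem.List.foldl_pyRange_pyGetD' (a := (m : Int)) (xs := xs) (d := d)
      (f := fun (acc : List Char) x => acc ++ [x]) (init := acc) (by positivity),
     PySem.List.foldl_append_singleton]
  simp

-- A's three-branch merge equals flattened zip plus both tails, for any u l.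
theorem pv_merge (u l : List Char) :
    (if u.length < l.length then
      (PySem.List.pyRange (u.length : Int) (l.length : Int) 1).foldl
        (fun acc j => acc ++ [PySem.List.pyGetD l j ' '])
        ((PySem.List.pyRange 0 (u.length : Int) 1).foldl
          (fun acc j => acc ++ [PySem.List.pyGetD u j ' ', PySem.List.pyGetD l j ' ']) [])
    else if l.length < u.length then
      (PySem.List.pyRange (l.length : Int) (u.length : Int) 1).foldl
        (fun acc j => acc ++ [PySem.List.pyGetD u j ' '])
        ((PySem.List.pyRange 0 (l.length : Int) 1).foldl
          (fun acc j => acc ++ [PySem.List.pyGetD u j ' ', PySem.List.pyGetD l j ' ']) [])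
    else if l.length = u.length then
      (PySem.List.pyRange 0 (l.length : Int) 1).foldl
        (fun acc j => acc ++ [PySem.List.pyGetD u j ' ', PySem.List.pyGetD l j ' ']) []
    else [])
    = (u.zip l).flatMap (fun p => [p.1, p.2])
      ++ u.drop (min u.length l.length) ++ l.drop (min u.length l.length) := by
  have hzip : (u.zip l).take (min u.length l.length) = u.zip l := by
    simp [List.take_of_length_le, List.length_zip]
  rcases lt_trichotomy u.length l.length with h | h | h
  · rw [if_pos h, pv_pairs ' ' u l u.length le_rfl (by omega), pv_tail]
    have hmin : min u.length l.length = u.length := by omega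
    rw [hmin] at hzip ⊢
    simp [hzip, List.drop_of_length_le]
  · rw [if_neg (by omega), if_neg (by omega), if_pos h.symm,
        pv_pairs ' ' u l l.length (by omega) le_rfl]
    have hmin : min u.length l.length = l.length := by omega
    rw [hmin] at hzip ⊢
    simp [hzip, List.drop_of_length_le, le_of_eq h]
  · rw [if_neg (by omega), if_pos h, pv_pairs ' ' u l l.length (by omega) le_rfl, pv_tail]
    have hmin : min u.length l.length = l.length := by omega
    rw [hmin] at hzip ⊢
    simp [hzip, List.drop_of_length_le]

-- B's iterator merge equals the same flattened zip plus both tails.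
theorem pv_interleave_eq (u l : List Char) :
    pvInterleave u l
    = (u.zip l).flatMap (fun p => [p.1, p.2])
      ++ u.drop (min u.length l.length) ++ l.drop (min u.length l.length) := by
  induction u generalizing l with
  | nil => simp [pvInterleave]
  | cons x us ih =>
    cases l with
    | nil => simp [pvInterleave, ih []]
    | cons y ls => simp [pvInterleave, ih ls, Nat.succ_min_succ]

-- On domain chars, Python's isupper is exactly the code range 65..90.
set_option maxRecDepth 10000 in
theorem pv_isupper_char (c : Char) (h : pvDomChar c = true) :
    PySem.Chars.isupper c = decide (65 ≤ c.toNat ∧ c.toNat ≤ 90) := by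
  have hall : ∀ n ∈ List.range 127,
      PySem.Chars.isupper (Char.ofNat n) = decide (65 ≤ n ∧ n ≤ 90) := by decide
  have hlt : c.toNat < 127 := by
    simp [pvDomChar] at h
    omega
  have := hall c.toNat (List.mem_range.mpr hlt)
  simpa [Char.ofNat_toNat] using this

-- counts in the counting-sort build: one block per code, so count c is cs.count c
-- iff c's code is listed.
theorem pv_count_flat (cs : List Char) (codes : List Nat)
    (hnd : codes.Nodup) (hv : ∀ n ∈ codes, n < 128) (c : Char) :
    (codes.flatMap (fun n => List.replicate (cs.count (Char.ofNat n)) (Char.ofNat n))).count c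
    = if c.toNat ∈ codes then cs.count c else 0 := by
  induction codes with
  | nil => simp
  | cons n rest ih =>
    have hn : n < 128 := hv n (List.mem_cons_self ..)
    have hofnat : (Char.ofNat n).toNat = n := by
      have hvn : Nat.isValidChar n := Or.inl (by omega)
      simp [Char.ofNat, hvn, Char.toNat, Char.ofNatAux]
    have hnod := (List.nodup_cons.mp hnd)
    rw [List.flatMap_cons, List.count_append, List.count_replicate,
        ih hnod.2 (fun m hm => hv m (List.mem_cons_of_mem _ hm))]
    simp only [List.mem_cons]
    by_cases hceq : c.toNat = n
    · have hc : Char.ofNat n = c := by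
        rw [← hceq, Char.ofNat_toNat]
      simp only [hc, hceq]
      simp only [beq_self_eq_true, true_or, if_pos]
      have hr : ¬ n ∈ rest := hnod.1
      simp [hr]
    · have hc : (Char.ofNat n == c) = false := by
        simp only [beq_eq_false_iff_ne, ne_eq]
        intro hcc
        exact hceq (by rw [← hcc, hofnat])
      simp [hc, hceq]

-- the counting-sort build is ordered.
theorem pv_pairwise_flat (cs : List Char) (codes : List Nat)
    (hv : ∀ n ∈ codes, n < 128) (hs : codes.Pairwise (· ≤ ·)) :
    (codes.flatMap (fun n => List.replicate (cs.count (Char.ofNat n)) (Char.ofNat n))).Pairwise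
      (fun a b => a ≤ b) := by
  induction codes with
  | nil => simp
  | cons n rest ih =>
    rw [List.flatMap_cons, List.pairwise_append]
    refine ⟨List.pairwise_replicate.mpr (Or.inr le_rfl),
      ih (fun m hm => hv m (List.mem_cons_of_mem _ hm)) (List.pairwise_cons.mp hs).2, ?_⟩
    intro a ha b hb
    have ha' : a = Char.ofNat n := List.eq_of_mem_replicate ha
    obtain ⟨m, hm, hbm⟩ := List.mem_flatMap.mp hb
    have hb' : b = Char.ofNat m := List.eq_of_mem_replicate hbm
    have hnm : n ≤ m := (List.pairwise_cons.mp hs).1 m hm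
    have hn : n < 128 := hv n (List.mem_cons_self ..)
    have hm' : m < 128 := hv m (List.mem_cons_of_mem _ hm)
    have h1 : (Char.ofNat n).toNat = n := by
      have hvn : Nat.isValidChar n := Or.inl (by omega)
      simp [Char.ofNat, hvn, Char.toNat, Char.ofNatAux]
    have h2 : (Char.ofNat m).toNat = m := by
      have hvm : Nat.isValidChar m := Or.inl (by omega)
      simp [Char.ofNat, hvm, Char.toNat, Char.ofNatAux]
    subst ha' hb'
    apply Char.le_def.mpr
    apply UInt32.le_iff_toNat_le.mpr
    show (Char.ofNat n).toNat ≤ (Char.ofNat m).toNat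
    omega

-- the code lists B scans, as Nat lists
def pvUpCodes : List Nat := List.range' 65 26
def pvLowCodes : List Nat := (List.range 128).filter (fun n => n < 65 || 91 ≤ n)

-- B's two pyRange scans are the flatMaps over those code lists.
theorem pv_upper_build (cs : List Char) :
    (PySem.List.pyRange 65 91 1).flatMap
      (fun i => List.replicate (PySem.List.count cs (Char.ofNat i.toNat)) (Char.ofNat i.toNat))
    = pvUpCodes.flatMap (fun n => List.replicate (cs.count (Char.ofNat n)) (Char.ofNat n)) := rfl

theorem pv_lower_build (cs : List Char) :
    (PySem.List.pyRange 0 128 1).flatMap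
      (fun i => if i < 65 || 91 ≤ i then
          List.replicate (PySem.List.count cs (Char.ofNat i.toNat)) (Char.ofNat i.toNat)
        else [])
    = pvLowCodes.flatMap (fun n => List.replicate (cs.count (Char.ofNat n)) (Char.ofNat n)) := rfl

-- count in a filtered list, unconditional form.
theorem pv_count_filter (p : Char → Bool) (c : Char) (l : List Char) :
    (l.filter p).count c = if p c then l.count c else 0 := by
  by_cases h : p c
  · simp [List.count_filter, h]
  · simp [h]
    simp [List.count_eq_zero, List.mem_filter, h]

-- the counting-sort build IS sorted(filter): upper side.
theorem pv_upper_sorted (cs : List Char) (hdom : ∀ c ∈ cs, pvDomChar c = true) :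
    PySem.List.sorted (cs.filter (fun c => PySem.Chars.isupper c)) (fun c => c) false
    = pvUpCodes.flatMap (fun n => List.replicate (cs.count (Char.ofNat n)) (Char.ofNat n)) := by
  apply PySem.List.sorted_id_eq_of_perm_of_pairwise
  · rw [List.perm_iff_count]
    intro c
    rw [pv_count_flat cs pvUpCodes (by decide) (by decide) c, pv_count_filter]
    have hmem : (c.toNat ∈ pvUpCodes) ↔ (65 ≤ c.toNat ∧ c.toNat ≤ 90) := by
      rw [pvUpCodes, List.mem_range'_1]
      omega
    by_cases hz : cs.count c = 0
    · simp [hz]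
    · have hc : c ∈ cs := List.count_pos_iff.mp (Nat.pos_of_ne_zero hz)
      rw [pv_isupper_char c (hdom c hc)]
      by_cases hu : 65 ≤ c.toNat ∧ c.toNat ≤ 90 <;> simp [hu, hmem]
  · exact pv_pairwise_flat cs pvUpCodes (by decide) (by decide)

-- the counting-sort build IS sorted(filter): lower side.
theorem pv_lower_sorted (cs : List Char) (hdom : ∀ c ∈ cs, pvDomChar c = true) :
    PySem.List.sorted (cs.filter (fun c => !PySem.Chars.isupper c)) (fun c => c) false
    = pvLowCodes.flatMap (fun n => List.replicate (cs.count (Char.ofNat n)) (Char.ofNat n)) := by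
  apply PySem.List.sorted_id_eq_of_perm_of_pairwise
  · rw [List.perm_iff_count]
    intro c
    rw [pv_count_flat cs pvLowCodes (by decide) (by decide) c, pv_count_filter]
    have hmem : (c.toNat ∈ pvLowCodes) ↔ (c.toNat < 128 ∧ ¬(65 ≤ c.toNat ∧ c.toNat ≤ 90)) := by
      simp only [pvLowCodes, List.mem_filter, List.mem_range, Bool.or_eq_true, decide_eq_true_eq]
      omega
    by_cases hz : cs.count c = 0
    · simp [hz]
    · have hc : c ∈ cs := List.count_pos_iff.mp (Nat.pos_of_ne_zero hz)
      have hd := hdom c hc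
      have hlt : c.toNat < 128 := by
        simp [pvDomChar] at hd
        omega
      rw [pv_isupper_char c hd]
      by_cases hu : 65 ≤ c.toNat ∧ c.toNat ≤ 90 <;> simp [hu, hmem, hlt]
  · exact pv_pairwise_flat cs pvLowCodes (by decide) (by decide)

-- ===== VERDICT (by name: the statement is the Claim_ definition above) =====
theorem alternate_sorted_string_spec : Claim_equal_alternate_sorted_string := by
  intro s hdom
  have hdom' : ∀ c ∈ s.toList, pvDomChar c = true := by
    intro c hc
    exact List.all_eq_true.mp hdom c hc
  unfold Spec_alternate_sorted_string alternate_sorted_string alternate_sorted_string_alt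
  rw [pv_part]
  simp only [List.nil_append]
  rw [pv_merge, pv_upper_build, pv_lower_build, pv_interleave_eq,
      ← pv_upper_sorted s.toList hdom', ← pv_lower_sorted s.toList hdom']
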